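-- pv_equiv track=rewrite | github.com/road3144/Algorithm | implement/pr_nonEnoughMoney_lv1.py | solution
-- ===== SOURCE A (Python) =====
-- def solution(price, money, count):
--     answer = -1
--
--     total_price = 0
--     for i in range(1, count + 1):
--         total_price += price * i
--     if total_price <= money:
--         answer = 0
--     else:
--         answer = total_price - money
--
--     return answer
-- ===== SOURCE B (Python) =====
-- def solution(price, money, count):
--     n = count if count > 0 else 0
--     total = price * n * (n + 1) // 2
--     return 0 if total <= money else total - money
-- ===== Notes on version B (the rewrite author's own statement) =====
-- stated objective: faster
-- what changed: Replaces the O(count) accumulation loop with the arithmetic-series closed form price*n*(n+1)//2 (n = max(count,0)).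
import Mathlib
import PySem

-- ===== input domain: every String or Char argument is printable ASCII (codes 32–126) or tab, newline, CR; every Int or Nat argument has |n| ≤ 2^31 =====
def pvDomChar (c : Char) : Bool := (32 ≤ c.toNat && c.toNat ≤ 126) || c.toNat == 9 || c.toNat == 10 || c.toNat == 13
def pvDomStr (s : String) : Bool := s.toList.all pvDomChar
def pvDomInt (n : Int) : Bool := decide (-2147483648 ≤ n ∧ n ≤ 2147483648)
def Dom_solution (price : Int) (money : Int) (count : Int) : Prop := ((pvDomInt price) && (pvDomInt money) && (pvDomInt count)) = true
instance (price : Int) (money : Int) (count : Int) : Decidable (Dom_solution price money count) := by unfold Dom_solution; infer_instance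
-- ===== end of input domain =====

-- B replaces A's O(count) accumulation loop with the arithmetic-series closed form price*n*(n+1)//2 (n = max(count,0)): faster.


-- ===== PORT A =====
def solution (price : Int) (money : Int) (count : Int) : Int :=
  let total_price := (PySem.List.pyRange 1 (count + 1) 1).foldl (fun acc i => acc + price * i) 0
  if total_price ≤ money then 0 else total_price - money

-- ===== PORT B =====
def solution_alt (price : Int) (money : Int) (count : Int) : Int :=
  let n := if count > 0 then count else 0
  let total := PySem.Int.floordiv (price * n * (n + 1)) 2
  if total ≤ money then 0 else total - money

-- ===== PRECONDITION & SPEC =====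
def Spec_solution (price : Int) (money : Int) (count : Int) (out : Int) : Prop := out = solution_alt price money count
instance (price : Int) (money : Int) (count : Int) (out : Int) : Decidable (Spec_solution price money count out) := by unfold Spec_solution; infer_instance

-- ===== CLAIM (what is proved, stated in full; the proofs are below) =====
def Claim_equal_solution : Prop := ∀ (price : Int) (money : Int) (count : Int), Dom_solution price money count → Spec_solution price money count (solution price money count)

-- ===== LEMMAS AND PROOFS =====

-- twice A's loop total over range(1, n+1) equals price*n*(n+1)
theorem pv_two_mul_fold (price : Int) : ∀ (n : Nat),
    2 * ((PySem.List.pyRange 1 ((n : Int) + 1) 1).foldl (fun acc i => acc + price * i) 0)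
      = price * (n : Int) * ((n : Int) + 1) := by
  intro n
  induction n with
  | zero => simp [PySem.List.pyRange_one_eq_nil]
  | succ k ih =>
    have h : PySem.List.pyRange 1 (((k : Int) + 1) + 1) 1
        = PySem.List.pyRange 1 ((k : Int) + 1) 1 ++ [(k : Int) + 1] :=
      PySem.List.pyRange_one_succ_right (by omega)
    push_cast
    rw [h, List.foldl_append]
    simp only [List.foldl_cons, List.foldl_nil]
    push_cast at ih
    ring_nf
    ring_nf at ih
    omega

theorem pv_fold_eq_closed (price count : Int) (h : 0 < count) :
    (PySem.List.pyRange 1 (count + 1) 1).foldl (fun acc i => acc + price * i) 0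
      = PySem.Int.floordiv (price * count * (count + 1)) 2 := by
  obtain ⟨n, rfl⟩ : ∃ n : Nat, count = (n : Int) := ⟨count.toNat, by omega⟩
  rw [← pv_two_mul_fold price n, PySem.Int.floordiv_eq_ediv_of_pos (by omega)]
  omega

-- ===== VERDICT (by name: the statement is the Claim_ definition above) =====
theorem solution_spec : Claim_equal_solution := by
  intro price money count _
  unfold Spec_solution solution solution_alt
  by_cases h : 0 < count
  · simp only [h, if_pos]
    rw [pv_fold_eq_closed price count h]
  · have hnil : PySem.List.pyRange 1 (count + 1) 1 = [] :=
      PySem.List.pyRange_one_eq_nil (by omega)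
    simp [hnil, h, PySem.Int.floordiv]
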